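-- pv_equiv track=rewrite | github.com/Jonah005/qdrant-proxy | server.py | _previous_turn_was_clarify
-- ===== SOURCE A (Python) =====
-- from typing import List, Dict, Optional
--
-- def _previous_turn_was_clarify(history: Optional[List[Dict[str, str]]]) -> bool:
--     if not history:
--         return False
--     # scan back until we hit the last assistant message or user message
--     for m in reversed(history):
--         role = m.get("role")
--         content = (m.get("content") or "").lower()
--         if role == "assistant":
--             # treat any assistant message containing "clarif" as a clarify turn
--             return "clarif" in content
--         if role == "user":
--             # user turn after assistant; if we didn't find an assistant clarify earlier, return False
--             return False
--     return False
-- ===== SOURCE B (Python) =====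
-- from typing import List, Dict, Optional
--
-- def _previous_turn_was_clarify(history: Optional[List[Dict[str, str]]]) -> bool:
--     # Forward single pass: keep a running verdict; each assistant/user message
--     # overwrites it, so at the end it reflects the latest relevant message.
--     verdict = False
--     for m in (history or []):
--         role = m.get("role")
--         if role == "assistant":
--             verdict = "clarif" in (m.get("content") or "").lower()
--         elif role == "user":
--             verdict = False
--     return verdict
-- ===== Notes on version B (the rewrite author's own statement) =====
-- stated objective: alternative
-- what changed: Replaces A's backwards early-exit scan with a forward single pass that maintains a running verdict accumulator overwritten by each assistant/user message.
import Mathlib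
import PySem

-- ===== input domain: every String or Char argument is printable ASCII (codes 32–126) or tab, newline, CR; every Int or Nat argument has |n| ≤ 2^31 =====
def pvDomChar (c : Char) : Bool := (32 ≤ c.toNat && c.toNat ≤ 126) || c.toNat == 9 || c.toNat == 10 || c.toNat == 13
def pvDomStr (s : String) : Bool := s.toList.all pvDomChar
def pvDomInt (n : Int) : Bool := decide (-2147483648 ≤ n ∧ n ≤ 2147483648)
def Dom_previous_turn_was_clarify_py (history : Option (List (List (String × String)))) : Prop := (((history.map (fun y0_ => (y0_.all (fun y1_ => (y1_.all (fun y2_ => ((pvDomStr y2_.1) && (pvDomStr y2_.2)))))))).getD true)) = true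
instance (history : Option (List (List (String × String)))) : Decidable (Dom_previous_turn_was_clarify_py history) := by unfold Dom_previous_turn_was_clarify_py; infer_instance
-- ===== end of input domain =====

-- B replaces A's backwards early-exit scan with a forward single pass maintaining
-- a running verdict accumulator (objective: alternative decomposition).
-- ===== PORT A =====
-- the 'for m in reversed(history)' loop with its two early returns
def pvScanA : List (List (String × String)) → Bool
  | [] => false
  | m :: rest =>
    let role := (PySem.Dict.mk m).get? "role"
    let content := PySem.Str.lower (((PySem.Dict.mk m).get? "content").getD "")
    if role = some "assistant" then PySem.Str.isIn "clarif" content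
    else if role = some "user" then false
    else pvScanA rest

def previous_turn_was_clarify_py (history : Option (List (List (String × String)))) : Bool :=
  match history with
  | none => false
  | some h => if h.isEmpty then false else pvScanA h.reverse

-- ===== PORT B =====
-- one step of B's forward loop: the running verdict updated by one message
def pvStepB (verdict : Bool) (m : List (String × String)) : Bool :=
  let role := (PySem.Dict.mk m).get? "role"
  if role = some "assistant" then
    PySem.Str.isIn "clarif" (PySem.Str.lower (((PySem.Dict.mk m).get? "content").getD ""))
  else if role = some "user" then false
  else verdict

def previous_turn_was_clarify_py_alt (history : Option (List (List (String × String)))) : Bool :=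
  (history.getD []).foldl pvStepB false

-- ===== PRECONDITION & SPEC =====
def Spec_previous_turn_was_clarify_py (history : Option (List (List (String × String)))) (out : Bool) : Prop := out = previous_turn_was_clarify_py_alt history
instance (history : Option (List (List (String × String)))) (out : Bool) : Decidable (Spec_previous_turn_was_clarify_py history out) := by unfold Spec_previous_turn_was_clarify_py; infer_instance

-- ===== CLAIM (what is proved, stated in full; the proofs are below) =====
def Claim_equal_previous_turn_was_clarify_py : Prop := ∀ (history : Option (List (List (String × String)))), Dom_previous_turn_was_clarify_py history → Spec_previous_turn_was_clarify_py history (previous_turn_was_clarify_py history)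

-- ===== LEMMAS AND PROOFS =====
-- A's reverse scan equals B's forward fold (induction from the right)
lemma foldl_eq_scanA (l : List (List (String × String))) :
    l.foldl pvStepB false = pvScanA l.reverse := by
  induction l using List.reverseRecOn with
  | nil => simp [pvScanA]
  | append_singleton xs m ih =>
    rw [List.foldl_append, List.reverse_append]
    simp only [List.foldl_cons, List.foldl_nil, List.reverse_singleton, List.singleton_append]
    by_cases ha : (PySem.Dict.mk m).get? "role" = some "assistant"
    · simp [pvStepB, pvScanA, ha]
    · by_cases hu : (PySem.Dict.mk m).get? "role" = some "user"
      · simp [pvStepB, pvScanA, hu]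
      · simp [pvStepB, pvScanA, ha, hu, ih]

-- ===== VERDICT (by name: the statement is the Claim_ definition above) =====
theorem previous_turn_was_clarify_py_spec : Claim_equal_previous_turn_was_clarify_py := by
  unfold Claim_equal_previous_turn_was_clarify_py
  intro history _
  unfold Spec_previous_turn_was_clarify_py
  cases history with
  | none => simp [previous_turn_was_clarify_py, previous_turn_was_clarify_py_alt]
  | some h =>
    cases h with
    | nil => simp [previous_turn_was_clarify_py, previous_turn_was_clarify_py_alt]
    | cons m rest =>
      simp only [previous_turn_was_clarify_py, previous_turn_was_clarify_py_alt,
        Option.getD_some, List.isEmpty_cons, if_neg (by decide : ¬ (false = true))]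
      exact (foldl_eq_scanA (m :: rest)).symm
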